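-- pv_equiv track=rewrite | github.com/chomu97/algorithm | programmers/programmers17681.py | solution
-- ===== SOURCE A (Python) =====
-- def solution(n, arr1, arr2):
--     answer = []
--     for i in range(n):
--         tmp1 = get_binary_num(arr1[i], [])
--         tmp2 = get_binary_num(arr2[i], [])
--         while len(tmp1) < n:
--             tmp1.append(0)
--         while len(tmp2) < n:
--             tmp2.append(0)
--         tmp1.reverse()
--         tmp2.reverse()
--         decrypted = ['#' if a or b else ' ' for a,b in zip(tmp1,tmp2)]
--         answer.append(''.join(decrypted))
--     return answer
--
-- def get_binary_num(n, lst):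
--     a, b = divmod(n, 2)
--     lst.append(b)
--     if a == 0:
--         return lst
--     else:
--         return get_binary_num(a, lst)
-- ===== SOURCE B (Python) =====
-- def solution(n, arr1, arr2):
--     table = str.maketrans('10', '# ')
--     return [format(arr1[i] | arr2[i], f'0{n}b').translate(table) for i in range(n)]
-- ===== Notes on version B (the rewrite author's own statement) =====
-- stated objective: simpler
-- what changed: B ORs the two row integers first and formats the result as one fixed-width binary string in a single comprehension, replacing A's recursive bit-list builder, while-loop padding, reverse and positional zip of two bit lists.
-- outside the precondition, e.g. on solution(2, [5, 1], [1, 2]): A returns ['##', '##'], B returns ['# #', '##']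
import Mathlib
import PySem

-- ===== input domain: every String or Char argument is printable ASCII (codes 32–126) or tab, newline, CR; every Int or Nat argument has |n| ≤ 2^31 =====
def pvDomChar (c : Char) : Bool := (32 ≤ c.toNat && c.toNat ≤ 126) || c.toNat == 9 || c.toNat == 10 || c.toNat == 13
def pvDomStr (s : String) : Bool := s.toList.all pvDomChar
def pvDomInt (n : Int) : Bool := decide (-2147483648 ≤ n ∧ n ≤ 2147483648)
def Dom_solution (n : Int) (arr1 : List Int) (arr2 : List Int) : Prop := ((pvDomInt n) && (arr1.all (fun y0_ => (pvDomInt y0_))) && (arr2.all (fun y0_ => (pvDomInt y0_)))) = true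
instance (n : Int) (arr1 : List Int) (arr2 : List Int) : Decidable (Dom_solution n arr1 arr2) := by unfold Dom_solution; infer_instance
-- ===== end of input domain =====

-- B OR-s the two row integers first and formats the result as one fixed-width binary string,
-- replacing A's recursive bit-list builder, while-loop padding, reverse and positional zip.

-- ===== PORT A =====
-- get_binary_num(n, lst): recursion on the quotient.  The fuel argument (64) only makes the
-- Python recursion total in Lean; it is never exhausted on inputs admitted by Pre_solution.
def getBinaryNum : Nat → Int → List Int → List Int
  | 0, _, lst => lst
  | fuel+1, v, lst =>
    let a := PySem.Int.floordiv v 2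
    let b := PySem.Int.mod v 2
    let lst' := lst ++ [b]
    if a = 0 then lst' else getBinaryNum fuel a lst'

-- 'while len(tmp) < n: tmp.append(0)'
def padEnd (n : Nat) (l : List Int) : List Int := l ++ List.replicate (n - l.length) 0

def solution (n : Int) (arr1 : List Int) (arr2 : List Int) : List String :=
  (List.range n.toNat).foldl (fun answer (i : Nat) =>
    let tmp1 := (padEnd n.toNat (getBinaryNum 64 (PySem.List.pyGetD arr1 (i : Int) 0) [])).reverse
    let tmp2 := (padEnd n.toNat (getBinaryNum 64 (PySem.List.pyGetD arr2 (i : Int) 0) [])).reverse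
    let decrypted := (tmp1.zip tmp2).map (fun p => if p.1 ≠ 0 ∨ p.2 ≠ 0 then '#' else ' ')
    answer ++ [String.ofList decrypted]) []

-- ===== PORT B =====
-- format(v, 'b') for v ≥ 0: binary digits, most significant first
def natBin (v : Nat) : List Char :=
  let d := if v % 2 = 1 then '1' else '0'
  if h : v < 2 then [d] else natBin (v / 2) ++ [d]
decreasing_by exact Nat.div_lt_self (by omega) (by omega)

-- format(v, f'0{w}b'): left-pad with '0' to total width w ('-' then the padded digits of |v| if v < 0)
def formatBin (w : Nat) (v : Int) : List Char :=
  if v < 0 then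
    let s := natBin (-v).toNat
    '-' :: (List.replicate (w - 1 - s.length) '0' ++ s)
  else
    let s := natBin v.toNat
    List.replicate (w - s.length) '0' ++ s

-- str.translate(str.maketrans('10', '# '))
def translate10 (s : List Char) : List Char :=
  s.map (fun c => if c = '1' then '#' else if c = '0' then ' ' else c)

def solution_alt (n : Int) (arr1 : List Int) (arr2 : List Int) : List String :=
  (List.range n.toNat).map (fun (i : Nat) =>
    String.ofList (translate10 (formatBin n.toNat
      (PySem.Int.bor (PySem.List.pyGetD arr1 (i : Int) 0) (PySem.List.pyGetD arr2 (i : Int) 0)))))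

-- ===== PRECONDITION & SPEC =====
-- Pre_solution keeps the problem's domain plus the harmless corners: each array holds at least n
-- rows, every used entry is ≥ 0 (A hits RecursionError on a negative entry, IndexError on a short
-- array), and each row pair either fits in n bits — the problem's guarantee — or has entries of
-- equal bit length; on a row with entries of unequal bit length not both < 2^n, A's zip silently
-- truncates and top-aligns the two bit lists, a corner the problem never specifies.
def Pre_solution (n : Int) (arr1 : List Int) (arr2 : List Int) : Prop :=
  n.toNat ≤ arr1.length ∧ n.toNat ≤ arr2.length ∧
  ∀ p ∈ (arr1.take n.toNat).zip (arr2.take n.toNat),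
    (0 ≤ p.1 ∧ 0 ≤ p.2) ∧
    ((p.1 < 2 ^ n.toNat ∧ p.2 < 2 ^ n.toNat) ∨ PySem.Int.bitLength p.1 = PySem.Int.bitLength p.2)
instance (n : Int) (arr1 : List Int) (arr2 : List Int) : Decidable (Pre_solution n arr1 arr2) := by
  unfold Pre_solution; infer_instance

def pvWitness_solution : Int × List Int × List Int := (2, [2, 3], [1, 0])

def Spec_solution (n : Int) (arr1 : List Int) (arr2 : List Int) (out : List String) : Prop := out = solution_alt n arr1 arr2
instance (n : Int) (arr1 : List Int) (arr2 : List Int) (out : List String) : Decidable (Spec_solution n arr1 arr2 out) := by unfold Spec_solution; infer_instance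

-- ===== CLAIM (what is proved, stated in full; the proofs are below) =====
def Claim_equal_solution : Prop := ∀ (n : Int) (arr1 : List Int) (arr2 : List Int), Dom_solution n arr1 arr2 → Pre_solution n arr1 arr2 → Spec_solution n arr1 arr2 (solution n arr1 arr2)

-- ===== LEMMAS AND PROOFS =====

-- LSB-first bit list of x, as A's get_binary_num produces it (length = bit length of x, ≥ 1)
def lsbBits (x : Nat) : List Nat :=
  if h : x < 2 then [x % 2] else x % 2 :: lsbBits (x / 2)
decreasing_by exact Nat.div_lt_self (by omega) (by omega)

-- the k low bits of x, LSB first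
def bitsLE : Nat → Nat → List Nat
  | 0, _ => []
  | k+1, x => x % 2 :: bitsLE k (x / 2)

def digitChar (b : Nat) : Char := if b = 1 then '1' else '0'

theorem zip_reverse' {α β : Type} : ∀ (l1 : List α) (l2 : List β), l1.length = l2.length →
    l1.reverse.zip l2.reverse = (l1.zip l2).reverse := by
  intro l1
  induction l1 with
  | nil => intro l2 h; cases l2 <;> simp_all
  | cons x xs ih =>
    intro l2 h
    cases l2 with
    | nil => simp at h
    | cons y ys =>
      simp only [List.length_cons, Nat.add_right_cancel_iff] at h
      simp only [List.reverse_cons, List.zip_cons_cons]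
      rw [List.zip_append (by simpa using h), ih ys h]
      simp

theorem lor_mod_two (x y : Nat) : (x ||| y) % 2 = x % 2 ||| y % 2 := by
  simpa using Nat.or_mod_two_pow (a := x) (b := y) (n := 1)

theorem gbn_succ (f : Nat) (v : Int) (lst : List Int) :
    getBinaryNum (f + 1) v lst
      = if PySem.Int.floordiv v 2 = 0 then lst ++ [PySem.Int.mod v 2]
        else getBinaryNum f (PySem.Int.floordiv v 2) (lst ++ [PySem.Int.mod v 2]) := rfl

theorem gbn_eq (f : Nat) : ∀ (x : Nat) (acc : List Int), x < 2 ^ (f + 1) →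
    getBinaryNum (f + 1) (x : Int) acc = acc ++ (lsbBits x).map (fun b : Nat => (b : Int)) := by
  induction f with
  | zero =>
    intro x acc hx
    have hd : PySem.Int.floordiv (x : Int) 2 = ((x / 2 : Nat) : Int) := by
      exact_mod_cast PySem.Int.floordiv_natCast x 2
    have hm : PySem.Int.mod (x : Int) 2 = ((x % 2 : Nat) : Int) := by
      exact_mod_cast PySem.Int.mod_natCast x 2
    have hx2 : x < 2 := by simpa using hx
    have hq : x / 2 = 0 := by omega
    rw [gbn_succ, hd, hm, hq, lsbBits, dif_pos hx2]
    simp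
  | succ f ih =>
    intro x acc hx
    have hd : PySem.Int.floordiv (x : Int) 2 = ((x / 2 : Nat) : Int) := by
      exact_mod_cast PySem.Int.floordiv_natCast x 2
    have hm : PySem.Int.mod (x : Int) 2 = ((x % 2 : Nat) : Int) := by
      exact_mod_cast PySem.Int.mod_natCast x 2
    by_cases hx2 : x < 2
    · have hq : x / 2 = 0 := by omega
      rw [gbn_succ, hd, hm, hq, lsbBits, dif_pos hx2]
      simp
    · have hq : x / 2 ≠ 0 := by omega
      have hlt : x / 2 < 2 ^ (f + 1) := by
        have h2 : (2 : Nat) ^ (f + 1 + 1) = 2 ^ (f + 1) * 2 := pow_succ 2 (f + 1)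
        omega
      rw [gbn_succ, hd, hm, if_neg (by exact_mod_cast hq), lsbBits, dif_neg hx2]
      rw [ih (x / 2) (acc ++ [((x % 2 : Nat) : Int)]) hlt]
      simp

theorem bitsLE_zero (k : Nat) : bitsLE k 0 = List.replicate k 0 := by
  induction k with
  | zero => rfl
  | succ k ih => simp [bitsLE, ih, List.replicate_succ]

theorem bitsLE_length : ∀ (k x : Nat), (bitsLE k x).length = k := by
  intro k
  induction k with
  | zero => intro x; rfl
  | succ k ih => intro x; simp [bitsLE, ih]

theorem lsb_ge_one (x : Nat) : 1 ≤ (lsbBits x).length := by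
  rw [lsbBits]
  split <;> simp

theorem lsb_lt (x : Nat) : x < 2 ^ (lsbBits x).length := by
  induction x using Nat.strong_induction_on with
  | _ x ih =>
    rw [lsbBits]
    by_cases hx2 : x < 2
    · simpa [hx2] using hx2
    · have := ih (x / 2) (Nat.div_lt_self (by omega) (by omega))
      rw [dif_neg hx2]
      simp only [List.length_cons]
      have h2 : (2 : Nat) ^ ((lsbBits (x / 2)).length + 1) = 2 ^ (lsbBits (x / 2)).length * 2 :=
        pow_succ 2 _
      omega

theorem lsb_len_le (x : Nat) : ∀ (k : Nat), 1 ≤ k → x < 2 ^ k → (lsbBits x).length ≤ k := by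
  induction x using Nat.strong_induction_on with
  | _ x ih =>
    intro k hk hx
    by_cases hx2 : x < 2
    · rw [lsbBits, dif_pos hx2]; simpa using hk
    · obtain ⟨k', rfl⟩ : ∃ k', k = k' + 1 := ⟨k - 1, by omega⟩
      have hk' : 1 ≤ k' := by
        rcases Nat.eq_zero_or_pos k' with h | h
        · subst h; simp at hx; omega
        · exact h
      have hlt : x / 2 < 2 ^ k' := by
        have h2 : (2 : Nat) ^ (k' + 1) = 2 ^ k' * 2 := pow_succ 2 k'
        omega
      rw [lsbBits, dif_neg hx2]
      simpa using ih (x / 2) (Nat.div_lt_self (by omega) (by omega)) k' hk' hlt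

theorem lsb_single (t : Nat) (h : t < 2) : lsbBits t = [t % 2] := by
  rw [lsbBits, dif_pos h]

theorem lsb_cons (t : Nat) (h : ¬ t < 2) : lsbBits t = t % 2 :: lsbBits (t / 2) := by
  rw [lsbBits, dif_neg h]

theorem or_ge_two (x y : Nat) (h : ¬ y < 2) : ¬ x ||| y < 2 := by
  have hle : y ≤ x ||| y := Nat.right_le_or
  omega

theorem lsb_len_or (x : Nat) : ∀ (y : Nat),
    (lsbBits (x ||| y)).length = max (lsbBits x).length (lsbBits y).length := by
  induction x using Nat.strong_induction_on with
  | _ x ih =>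
    intro y
    by_cases hx2 : x < 2 <;> by_cases hy2 : y < 2
    · have hz2 : x ||| y < 2 := by
        simpa using Nat.or_lt_two_pow (n := 1) (by simpa using hx2) (by simpa using hy2)
      rw [lsb_single _ hx2, lsb_single _ hy2, lsb_single _ hz2]
      simp
    · have hz2 : ¬ x ||| y < 2 := or_ge_two x y hy2
      have hq : x / 2 = 0 := by omega
      rw [lsb_single _ hx2, lsb_cons y hy2, lsb_cons _ hz2, Nat.or_div_two, hq, Nat.zero_or]
      have := lsb_ge_one (y / 2)
      simp only [List.length_cons, List.length_nil]
      omega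
    · have hz2 : ¬ x ||| y < 2 := by rw [Nat.or_comm]; exact or_ge_two y x hx2
      have hq : y / 2 = 0 := by omega
      rw [lsb_single _ hy2, lsb_cons x hx2, lsb_cons _ hz2, Nat.or_div_two, hq, Nat.or_zero]
      have := lsb_ge_one (x / 2)
      simp only [List.length_cons, List.length_nil]
      omega
    · have hz2 : ¬ x ||| y < 2 := or_ge_two x y hy2
      rw [lsb_cons x hx2, lsb_cons y hy2, lsb_cons _ hz2, Nat.or_div_two]
      simp only [List.length_cons]
      rw [ih (x / 2) (Nat.div_lt_self (by omega) (by omega)) (y / 2)]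
      omega

theorem bitsLE_eq_pad (k : Nat) : ∀ (x : Nat), x < 2 ^ (k + 1) →
    bitsLE (k + 1) x = lsbBits x ++ List.replicate ((k + 1) - (lsbBits x).length) 0 := by
  induction k with
  | zero =>
    intro x hx
    have hx2 : x < 2 := by simpa using hx
    rw [lsbBits, dif_pos hx2]
    simp [bitsLE]
  | succ k ih =>
    intro x hx
    by_cases hx2 : x < 2
    · have hq : x / 2 = 0 := by omega
      rw [lsbBits, dif_pos hx2]
      simp [bitsLE, hq, bitsLE_zero, List.replicate_succ]
    · have hlt : x / 2 < 2 ^ (k + 1) := by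
        have h2 : (2 : Nat) ^ (k + 1 + 1) = 2 ^ (k + 1) * 2 := pow_succ 2 (k + 1)
        omega
      rw [lsbBits, dif_neg hx2]
      show x % 2 :: bitsLE (k + 1) (x / 2)
        = (x % 2 :: lsbBits (x / 2)) ++ List.replicate ((k + 1 + 1) - (x % 2 :: lsbBits (x / 2)).length) 0
      rw [ih (x / 2) hlt, List.cons_append, List.length_cons,
        show (k + 1 + 1) - ((lsbBits (x / 2)).length + 1) = (k + 1) - (lsbBits (x / 2)).length from by omega]

theorem natBin_eq (x : Nat) : natBin x = ((lsbBits x).map digitChar).reverse := by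
  induction x using Nat.strong_induction_on with
  | _ x ih =>
    rw [natBin, lsbBits]
    by_cases hx2 : x < 2
    · simp [hx2, digitChar]
    · rw [dif_neg hx2, dif_neg hx2, ih (x / 2) (Nat.div_lt_self (by omega) (by omega))]
      simp [digitChar]

theorem lsb_len_bitLength (x : Nat) :
    (lsbBits x).length = max 1 (PySem.Int.bitLength (x : Int)) := by
  induction x using Nat.strong_induction_on with
  | _ x ih =>
    by_cases hx2 : x < 2
    · interval_cases x <;> rw [lsbBits] <;> decide
    · have hbl : PySem.Int.bitLength (x : Int) = PySem.Int.bitLength ((x / 2 : Nat) : Int) + 1 :=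
        PySem.Int.bitLength_natCast (by omega)
      have hge : 1 ≤ PySem.Int.bitLength ((x / 2 : Nat) : Int) := by
        rw [PySem.Int.bitLength_natCast (m := x / 2) (by omega)]
        omega
      rw [lsbBits, dif_neg hx2]
      rw [List.length_cons, ih (x / 2) (Nat.div_lt_self (by omega) (by omega)), hbl]
      omega

theorem padEnd_bits (v M k : Nat) (hM : M = max k (lsbBits v).length) (hv : v < 2 ^ M) :
    padEnd k ((lsbBits v).map (fun b : Nat => (b : Int)))
      = (bitsLE M v).map (fun b : Nat => (b : Int)) := by
  obtain ⟨M', rfl⟩ : ∃ M', M = M' + 1 := ⟨M - 1, by have := lsb_ge_one v; omega⟩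
  rw [bitsLE_eq_pad M' v hv, padEnd]
  simp only [List.map_append, List.map_replicate, List.length_map, Nat.cast_zero]
  congr 2
  have := lsb_ge_one v
  omega

theorem core_zip (k : Nat) : ∀ (x y : Nat),
    (((bitsLE k x).map (fun b : Nat => (b : Int))).zip ((bitsLE k y).map (fun b : Nat => (b : Int)))).map
        (fun p => if p.1 ≠ 0 ∨ p.2 ≠ 0 then '#' else ' ')
      = (bitsLE k (x ||| y)).map (fun b =>
          if digitChar b = '1' then '#' else if digitChar b = '0' then ' ' else digitChar b) := by
  induction k with
  | zero => intro x y; rfl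
  | succ k ih =>
    intro x y
    show ((((x % 2 : Nat) : Int) :: (bitsLE k (x / 2)).map (fun b : Nat => (b : Int))).zip
        (((y % 2 : Nat) : Int) :: (bitsLE k (y / 2)).map (fun b : Nat => (b : Int)))).map _ = _
    rw [List.zip_cons_cons, List.map_cons]
    show _ = (fun b =>
        if digitChar b = '1' then '#' else if digitChar b = '0' then ' ' else digitChar b)
          ((x ||| y) % 2) :: (bitsLE k ((x ||| y) / 2)).map _
    rw [Nat.or_div_two, lor_mod_two, ih (x / 2) (y / 2)]
    congr 1
    rcases Nat.mod_two_eq_zero_or_one x with h1 | h1 <;>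
      rcases Nat.mod_two_eq_zero_or_one y with h2 | h2 <;>
        (simp [h1, h2, digitChar]; try decide)

theorem formatBin_eq (M k z : Nat) (hMz : M = max k (lsbBits z).length) (hzM : z < 2 ^ M) :
    translate10 (formatBin k (z : Int))
      = ((bitsLE M z).map (fun b =>
          if digitChar b = '1' then '#' else if digitChar b = '0' then ' ' else digitChar b)).reverse := by
  obtain ⟨M', rfl⟩ : ∃ M', M = M' + 1 := ⟨M - 1, by have := lsb_ge_one z; omega⟩
  rw [bitsLE_eq_pad M' z hzM]
  rw [formatBin, if_neg (by simp)]
  simp only [Int.toNat_natCast, natBin_eq, translate10, List.map_append, List.map_replicate,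
    List.map_reverse, List.map_map, List.reverse_append, List.reverse_reverse, List.length_reverse,
    List.length_map]
  rw [show ((M' + 1) - (lsbBits z).length) = k - (lsbBits z).length from by
    have := lsb_ge_one z; omega]
  all_goals simp [digitChar, Function.comp, List.reverse_replicate]

theorem row_eq (k x y : Nat) (hk : 1 ≤ k)
    (hcase : (x < 2 ^ k ∧ y < 2 ^ k) ∨ (lsbBits x).length = (lsbBits y).length)
    (hx64 : x < 2 ^ 64) (hy64 : y < 2 ^ 64) :
    (((padEnd k (getBinaryNum 64 (x : Int) [])).reverse.zip
        (padEnd k (getBinaryNum 64 (y : Int) [])).reverse).map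
      (fun p => if p.1 ≠ 0 ∨ p.2 ≠ 0 then '#' else ' '))
    = translate10 (formatBin k (PySem.Int.bor (x : Int) (y : Int))) := by
  have hgx : getBinaryNum 64 (x : Int) [] = (lsbBits x).map (fun b : Nat => (b : Int)) := by
    simpa using gbn_eq 63 x [] hx64
  have hgy : getBinaryNum 64 (y : Int) [] = (lsbBits y).map (fun b : Nat => (b : Int)) := by
    simpa using gbn_eq 63 y [] hy64
  have hzor : (lsbBits (x ||| y)).length = max (lsbBits x).length (lsbBits y).length :=
    lsb_len_or x y
  obtain ⟨M, hMx, hMy, hMz, hxM, hyM, hzM⟩ : ∃ M,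
      M = max k (lsbBits x).length ∧ M = max k (lsbBits y).length ∧
      M = max k (lsbBits (x ||| y)).length ∧ x < 2 ^ M ∧ y < 2 ^ M ∧ x ||| y < 2 ^ M := by
    rcases hcase with ⟨hx, hy⟩ | hLL
    · refine ⟨k, ?_, ?_, ?_, hx, hy, Nat.or_lt_two_pow hx hy⟩
      · have := lsb_len_le x k hk hx; omega
      · have := lsb_len_le y k hk hy; omega
      · have := lsb_len_le (x ||| y) k hk (Nat.or_lt_two_pow hx hy); omega
    · refine ⟨max k (lsbBits x).length, rfl, by omega, by omega, ?_, ?_, ?_⟩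
      · exact lt_of_lt_of_le (lsb_lt x)
          (Nat.pow_le_pow_right (by norm_num) (le_max_right _ _))
      · exact lt_of_lt_of_le (lsb_lt y)
          (Nat.pow_le_pow_right (by norm_num) (by omega))
      · exact lt_of_lt_of_le (lsb_lt (x ||| y))
          (Nat.pow_le_pow_right (by norm_num) (by omega))
  rw [hgx, hgy, padEnd_bits x M k hMx hxM, padEnd_bits y M k hMy hyM,
    zip_reverse' _ _ (by simp [bitsLE_length]), List.map_reverse, core_zip M]
  rw [show PySem.Int.bor (x : Int) (y : Int) = ((x ||| y : Nat) : Int) from by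
    exact_mod_cast PySem.Int.bor_natCast x y]
  rw [formatBin_eq M k (x ||| y) hMz hzM]

def rowA (n : Int) (arr1 : List Int) (arr2 : List Int) (i : Nat) : String :=
  String.ofList ((((padEnd n.toNat (getBinaryNum 64 (PySem.List.pyGetD arr1 (i : Int) 0) [])).reverse).zip
    ((padEnd n.toNat (getBinaryNum 64 (PySem.List.pyGetD arr2 (i : Int) 0) [])).reverse)).map
      (fun p => if p.1 ≠ 0 ∨ p.2 ≠ 0 then '#' else ' '))

theorem solA_aux (n : Int) (arr1 arr2 : List Int) : ∀ (l : List Nat) (init : List String),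
    l.foldl (fun answer (i : Nat) =>
      let tmp1 := (padEnd n.toNat (getBinaryNum 64 (PySem.List.pyGetD arr1 (i : Int) 0) [])).reverse
      let tmp2 := (padEnd n.toNat (getBinaryNum 64 (PySem.List.pyGetD arr2 (i : Int) 0) [])).reverse
      let decrypted := (tmp1.zip tmp2).map (fun p => if p.1 ≠ 0 ∨ p.2 ≠ 0 then '#' else ' ')
      answer ++ [String.ofList decrypted]) init = init ++ l.map (rowA n arr1 arr2) := by
  intro l
  induction l with
  | nil => intro init; simp
  | cons x xs ih => intro init; rw [List.foldl_cons, ih]; simp [rowA]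

-- ===== VERDICT (by name: the statement is the Claim_ definition above) =====
theorem solution_spec : Claim_equal_solution := by
  intro n arr1 arr2 hDom hPre
  obtain ⟨h1, h2, hrows⟩ := hPre
  simp only [Dom_solution, Bool.and_eq_true, List.all_eq_true, pvDomInt, decide_eq_true_eq] at hDom
  obtain ⟨⟨-, hD1⟩, hD2⟩ := hDom
  show solution n arr1 arr2 = solution_alt n arr1 arr2
  have hA : solution n arr1 arr2 = [] ++ (List.range n.toNat).map (rowA n arr1 arr2) :=
    solA_aux n arr1 arr2 (List.range n.toNat) []
  rw [hA, List.nil_append]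
  show _ = (List.range n.toNat).map _
  apply List.ext_getElem
  · simp
  · intro i hi1 hi2
    have hik : i < n.toNat := by simpa using hi1
    have hi1' : i < arr1.length := by omega
    have hi2' : i < arr2.length := by omega
    simp only [List.getElem_map, List.getElem_range]
    have hmem : (arr1[i], arr2[i]) ∈ (arr1.take n.toNat).zip (arr2.take n.toNat) := by
      have hz : ((arr1.take n.toNat).zip (arr2.take n.toNat))[i]'(by
          simp [List.length_zip, List.length_take]; omega) = (arr1[i], arr2[i]) := by
        simp [List.getElem_zip, List.getElem_take]
      rw [← hz]
      exact List.getElem_mem _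
    obtain ⟨⟨ha0, hb0⟩, hcase⟩ := hrows _ hmem
    simp only at ha0 hb0 hcase
    have hcast : ((2 ^ n.toNat : Nat) : Int) = 2 ^ n.toNat := by push_cast; ring
    have hxa : arr1[i] = ((arr1[i].toNat : Nat) : Int) := (Int.toNat_of_nonneg ha0).symm
    have hxb : arr2[i] = ((arr2[i].toNat : Nat) : Int) := (Int.toNat_of_nonneg hb0).symm
    have h64 : (2 : Nat) ^ 64 = 18446744073709551616 := by norm_num
    have hpair := List.of_mem_zip hmem
    have ha64 : arr1[i].toNat < 2 ^ 64 := by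
      have := hD1 _ (List.mem_of_mem_take hpair.1); omega
    have hb64 : arr2[i].toNat < 2 ^ 64 := by
      have := hD2 _ (List.mem_of_mem_take hpair.2); omega
    have hcaseN : (arr1[i].toNat < 2 ^ n.toNat ∧ arr2[i].toNat < 2 ^ n.toNat)
        ∨ (lsbBits arr1[i].toNat).length = (lsbBits arr2[i].toNat).length := by
      rcases hcase with ⟨hu, hv⟩ | hbl
      · exact Or.inl ⟨by omega, by omega⟩
      · refine Or.inr ?_
        rw [lsb_len_bitLength, lsb_len_bitLength, ← hxa, ← hxb, hbl]
    unfold rowA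
    rw [PySem.List.pyGetD_natCast, PySem.List.pyGetD_natCast,
      List.getD_eq_getElem arr1 0 hi1', List.getD_eq_getElem arr2 0 hi2']
    rw [hxa, hxb]
    exact congrArg String.ofList
      (row_eq n.toNat arr1[i].toNat arr2[i].toNat (by omega) hcaseN ha64 hb64)
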